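-- pv_equiv track=rewrite | github.com/Shubhankar9934/Socio_Sim_AI | agents/narrative.py | _infer_narrative_stance
-- ===== SOURCE A (Python) =====
-- from typing import Dict, List, Optional, Tuple
--
-- _POSITIVE_STANCE_KEYWORDS = (
--     "support", "agree", "favor", "favour", "approve", "back", "stability",
--     "relief", "benefit", "help", "good idea", "should implement",
-- )
--
-- _NEGATIVE_STANCE_KEYWORDS = (
--     "oppose", "disagree", "against", "reject", "harm", "hurt", "bad idea",
--     "should not implement", "discourage", "risk", "concern", "worsen",
-- )
--
-- _NEUTRAL_STANCE_KEYWORDS = ("neutral", "mixed", "unsure", "depends")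
--
-- def _infer_narrative_stance(text: str) -> Optional[str]:
--     t = (text or "").lower()
--     if any(k in t for k in _NEUTRAL_STANCE_KEYWORDS):
--         return "neutral"
--     pos = any(k in t for k in _POSITIVE_STANCE_KEYWORDS)
--     neg = any(k in t for k in _NEGATIVE_STANCE_KEYWORDS)
--     if pos and not neg:
--         return "positive"
--     if neg and not pos:
--         return "negative"
--     return None
-- ===== SOURCE B (Python) =====
-- _POSITIVE_STANCE_KEYWORDS = (
--     "support", "agree", "favor", "favour", "approve", "back", "stability",
--     "relief", "benefit", "help", "good idea", "should implement",
-- )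
--
-- _NEGATIVE_STANCE_KEYWORDS = (
--     "oppose", "disagree", "against", "reject", "harm", "hurt", "bad idea",
--     "should not implement", "discourage", "risk", "concern", "worsen",
-- )
--
-- _NEUTRAL_STANCE_KEYWORDS = ("neutral", "mixed", "unsure", "depends")
--
--
-- def _infer_narrative_stance(text):
--     # Single left-to-right walk over the text: at each position test which
--     # keywords START there, instead of running a separate substring search
--     # per keyword over the whole text.
--     t = (text or "").lower()
--     pos = False
--     neg = False
--     for i in range(len(t)):
--         if any(t.startswith(k, i) for k in _NEUTRAL_STANCE_KEYWORDS):
--             return "neutral"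
--         pos = pos or any(t.startswith(k, i) for k in _POSITIVE_STANCE_KEYWORDS)
--         neg = neg or any(t.startswith(k, i) for k in _NEGATIVE_STANCE_KEYWORDS)
--     if pos and not neg:
--         return "positive"
--     if neg and not pos:
--         return "negative"
--     return None
-- ===== Notes on version B (the rewrite author's own statement) =====
-- stated objective: alternative
-- what changed: Replaces A's per-keyword substring searches (any(k in t) over three tuples, each scanning the whole text) with one left-to-right walk over the text that at each position tests which keywords start there, accumulating pos/neg flags and returning the neutral label immediately when a neutral keyword starts at the current position.
import Mathlib
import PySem

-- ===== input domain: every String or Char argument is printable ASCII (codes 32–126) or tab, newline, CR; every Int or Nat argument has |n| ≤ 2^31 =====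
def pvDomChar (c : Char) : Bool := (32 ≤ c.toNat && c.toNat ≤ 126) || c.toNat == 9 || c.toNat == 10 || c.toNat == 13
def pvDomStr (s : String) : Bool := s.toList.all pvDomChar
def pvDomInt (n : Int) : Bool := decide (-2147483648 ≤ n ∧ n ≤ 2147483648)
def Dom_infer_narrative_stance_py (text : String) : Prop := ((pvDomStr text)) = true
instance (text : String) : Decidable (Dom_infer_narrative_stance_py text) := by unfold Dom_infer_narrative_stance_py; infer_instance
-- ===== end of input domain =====

-- B replaces A's per-keyword substring searches over the whole text by one
-- left-to-right walk over the text that tests which keywords START at each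
-- position, accumulating pos/neg flags (objective: alternative).

-- ===== PORT A =====
def pvPositiveKeywords : List String :=
  ["support", "agree", "favor", "favour", "approve", "back", "stability",
   "relief", "benefit", "help", "good idea", "should implement"]

def pvNegativeKeywords : List String :=
  ["oppose", "disagree", "against", "reject", "harm", "hurt", "bad idea",
   "should not implement", "discourage", "risk", "concern", "worsen"]

def pvNeutralKeywords : List String := ["neutral", "mixed", "unsure", "depends"]

def infer_narrative_stance_py (text : String) : Option String :=
  -- '(text or "")' is the identity on str inputs ('' or '' == ''), so t = text.lower()
  let t := PySem.Str.lower text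
  if pvNeutralKeywords.any (fun k => PySem.Str.isIn k t) then some "neutral"
  else
    let pos := pvPositiveKeywords.any (fun k => PySem.Str.isIn k t)
    let neg := pvNegativeKeywords.any (fun k => PySem.Str.isIn k t)
    if pos && !neg then some "positive"
    else if neg && !pos then some "negative"
    else none

-- ===== PORT B =====
-- the final decision from the two accumulated flags (B's code after the loop)
def pvDecide (pos neg : Bool) : Option String :=
  if pos && !neg then some "positive"
  else if neg && !pos then some "negative"
  else none

-- the 'for i in range(len(t))' loop of B, as structural recursion on the
-- remaining suffix t[i:]; at each position test which keywords start there
def pvScan : List Char → Bool → Bool → Option String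
  | [], pos, neg => pvDecide pos neg
  | c :: rest, pos, neg =>
    let suf := c :: rest
    if pvNeutralKeywords.any (fun k => PySem.Chars.startswith suf k.toList) then
      some "neutral"
    else
      pvScan rest
        (pos || pvPositiveKeywords.any (fun k => PySem.Chars.startswith suf k.toList))
        (neg || pvNegativeKeywords.any (fun k => PySem.Chars.startswith suf k.toList))

def infer_narrative_stance_py_alt (text : String) : Option String :=
  let t := PySem.Str.lower text
  pvScan t.toList false false

-- ===== PRECONDITION & SPEC =====
def Spec_infer_narrative_stance_py (text : String) (out : Option String) : Prop := out = infer_narrative_stance_py_alt text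
instance (text : String) (out : Option String) : Decidable (Spec_infer_narrative_stance_py text out) := by unfold Spec_infer_narrative_stance_py; infer_instance

-- ===== CLAIM =====
def Claim_equal_infer_narrative_stance_py : Prop := ∀ (text : String), Dom_infer_narrative_stance_py text → Spec_infer_narrative_stance_py text (infer_narrative_stance_py text)

-- ===== LEMMAS AND PROOFS =====

/-- A keyword is a substring of `c :: s` iff it starts there or is a substring of `s`. -/
lemma isIn_cons (k : List Char) (c : Char) (s : List Char) :
    PySem.Chars.isIn k (c :: s)
      = (PySem.Chars.startswith (c :: s) k || PySem.Chars.isIn k s) := by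
  rw [Bool.eq_iff_iff]
  simp [PySem.Chars.isIn_iff_infix, PySem.Chars.startswith_iff, List.infix_cons_iff]

/-- Distribute a per-keyword `any` over `isIn_cons`. -/
lemma any_isIn_cons (kws : List String) (c : Char) (s : List Char) :
    kws.any (fun k => PySem.Chars.isIn k.toList (c :: s))
      = (kws.any (fun k => PySem.Chars.startswith (c :: s) k.toList)
         || kws.any (fun k => PySem.Chars.isIn k.toList s)) := by
  induction kws with
  | nil => simp
  | cons k ks ih =>
    simp only [List.any_cons]
    rw [isIn_cons, ih]
    cases PySem.Chars.startswith (c :: s) k.toList <;>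
      cases PySem.Chars.isIn k.toList s <;> simp

/-- Invariant of B's walk: it returns "neutral" iff a neutral keyword occurs in the
    remaining suffix, and otherwise decides from the flags extended by the
    positive/negative occurrences in that suffix. -/
lemma pvScan_eq (s : List Char) (pos neg : Bool) :
    pvScan s pos neg
      = if pvNeutralKeywords.any (fun k => PySem.Chars.isIn k.toList s) then some "neutral"
        else pvDecide
          (pos || pvPositiveKeywords.any (fun k => PySem.Chars.isIn k.toList s))
          (neg || pvNegativeKeywords.any (fun k => PySem.Chars.isIn k.toList s)) := by
  induction s generalizing pos neg with
  | nil =>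
    have h1 : pvNeutralKeywords.any (fun k => PySem.Chars.isIn k.toList []) = false := by decide
    have h2 : pvPositiveKeywords.any (fun k => PySem.Chars.isIn k.toList []) = false := by decide
    have h3 : pvNegativeKeywords.any (fun k => PySem.Chars.isIn k.toList []) = false := by decide
    simp [pvScan, h1, h2, h3]
  | cons c rest ih =>
    simp only [pvScan, any_isIn_cons, ih]
    by_cases h : pvNeutralKeywords.any (fun k => PySem.Chars.startswith (c :: rest) k.toList) = true
    · simp [h]
    · simp only [Bool.not_eq_true] at h
      simp [h, Bool.or_assoc]

-- ===== VERDICT =====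
theorem infer_narrative_stance_py_spec : Claim_equal_infer_narrative_stance_py := by
  intro text _
  unfold Spec_infer_narrative_stance_py infer_narrative_stance_py infer_narrative_stance_py_alt
  rw [pvScan_eq]
  simp [PySem.Str.isIn_eq, pvDecide]
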